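-- pv_equiv track=rewrite | github.com/8080509/Research | Python Code/PinnacleActions2.py | rootGen
-- ===== SOURCE A (Python) =====
-- def rootGenSub(k, upperFixed, pinLst):
-- 	if not k:
-- 		yield []
-- 		return
-- 	pinLst = pinLst.copy()
-- 	for j in range(2 * k - 1, min(upperFixed, pinLst.pop())):
-- 		for val in rootGenSub(k-1, j - 1, pinLst):
-- 			yield val + [j]
--
-- def rootGen(n, P):
-- 	# if not P:
-- 		# yield [*range(n)]
-- 		# return
-- 	P = sorted(P)
-- 	ops = [i for i in range(n) if i not in set(P)]
-- 	unset = [i for i in range(n) if i not in set(P)]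
-- 	for posLst in rootGenSub(len(P), n, P):
-- 		out = []
-- 		j = 0
-- 		unSetLst = [*unset]
-- 		pLst = P.copy()
-- 		for i in posLst:
-- 			while j < i:
-- 				out.append(unSetLst.pop(0))
-- 				j += 1
-- 			out.append(pLst.pop(0))
-- 			j += 1
-- 		out.extend(unSetLst)
-- 		yield out
-- ===== SOURCE B (Python) =====
-- def rootGenSub(k, upperFixed, pinLst):
-- 	if not k:
-- 		yield []
-- 		return
-- 	pinLst = pinLst.copy()
-- 	for j in range(2 * k - 1, min(upperFixed, pinLst.pop())):
-- 		for val in rootGenSub(k - 1, j - 1, pinLst):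
-- 			yield val + [j]
--
-- def rootGen(n, P):
-- 	P = sorted(P)
-- 	unset = [i for i in range(n) if i not in set(P)]
-- 	for posLst in rootGenSub(len(P), n, P):
-- 		pins = set(posLst)
-- 		m = posLst[-1] + 1 if posLst else 0
-- 		it_p = iter(P)
-- 		it_u = iter(unset)
-- 		out = [next(it_p) if i in pins else next(it_u) for i in range(m)]
-- 		out.extend(it_u)
-- 		yield out
-- ===== Notes on version B (the rewrite author's own statement) =====
-- stated objective: simpler
-- what changed: The per-permutation assembly is rewritten: instead of A's position-driven interleaving (an inner while loop popping from the front of the unset list before each pinnacle placement), B builds a pinnacle-position set and makes one uniform pass over range(last+1), drawing from the pinnacle iterator or the unset iterator depending on set membership; the recursive position generator is kept.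
import Mathlib
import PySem

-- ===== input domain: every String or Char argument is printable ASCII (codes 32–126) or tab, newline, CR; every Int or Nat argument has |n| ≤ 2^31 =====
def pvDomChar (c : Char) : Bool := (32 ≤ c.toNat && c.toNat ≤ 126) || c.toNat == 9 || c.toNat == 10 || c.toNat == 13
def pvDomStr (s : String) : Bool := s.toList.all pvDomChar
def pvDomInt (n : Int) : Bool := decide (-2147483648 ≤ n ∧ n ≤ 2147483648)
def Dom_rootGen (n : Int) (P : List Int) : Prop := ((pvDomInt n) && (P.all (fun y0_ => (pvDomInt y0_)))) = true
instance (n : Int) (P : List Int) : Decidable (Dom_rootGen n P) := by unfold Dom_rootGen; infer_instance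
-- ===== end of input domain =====

-- B keeps A's recursive pinnacle-position generator but replaces the position-driven
-- while/pop interleaving assembly by a single uniform pass over range(m) driven by a
-- position set (objective: simpler assembly; same asymptotic cost).

-- ===== PORT A =====
-- the inner 'while j < i: out.append(unSetLst.pop(0)); j += 1' loop
-- ([] branch is unreachable from rootGen; Python would raise IndexError there)
def pvFillA (i : Int) (j : Int) (unSet : List Int) (out : List Int) : Int × List Int × List Int :=
  if j < i then
    match unSet with
    | [] => (i, [], out)
    | u :: us => pvFillA i (j + 1) us (out ++ [u])
  else (j, unSet, out)
termination_by (i - j).toNat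
decreasing_by omega

-- the 'for i in posLst' assembly loop of rootGen
def pvAsmA : List Int → Int → List Int → List Int → List Int → List Int
  | [], _, unSet, _, out => out ++ unSet
  | i :: rest, j, unSet, pLst, out =>
    let s := pvFillA i j unSet out
    match pLst with
    | [] => s.2.2 ++ s.2.1            -- unreachable: pLst.pop(0) on [] raises in Python
    | p :: ps => pvAsmA rest (s.1 + 1) s.2.1 ps (s.2.2 ++ [p])

-- rootGenSub; the generator's yields collected in order.  'pinLst.pop()' = getLast?/dropLast
-- (the 'none' branch is unreachable from rootGen; Python raises IndexError there)
def rootGenSubA : Nat → Int → List Int → List (List Int)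
  | 0, _, _ => [[]]
  | k + 1, upperFixed, pinLst =>
    match pinLst.getLast? with
    | none => []
    | some last =>
      (PySem.List.pyRange (2 * ((k : Int) + 1) - 1) (min upperFixed last) 1).flatMap
        (fun j => (rootGenSubA k (j - 1) pinLst.dropLast).map (fun val => val ++ [j]))

def rootGen (n : Int) (P : List Int) : List (List Int) :=
  let Ps := PySem.List.sorted P (fun x => x) false
  let _ops := (PySem.List.pyRange 0 n 1).filter (fun i => !(PySem.Set.contains (PySem.Set.ofList Ps) i))
  let unset := (PySem.List.pyRange 0 n 1).filter (fun i => !(PySem.Set.contains (PySem.Set.ofList Ps) i))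
  (rootGenSubA Ps.length n Ps).map (fun posLst => pvAsmA posLst 0 unset Ps [])

-- ===== PORT B =====
-- the comprehension '[next(it_p) if i in pins else next(it_u) for i in range(m)]':
-- returns (emitted list, remaining it_p, remaining it_u); the exhausted-iterator
-- branches are unreachable from rootGen_alt
def pvBuildB (S : PySem.Set Int) : List Int → List Int → List Int → List Int × List Int × List Int
  | [], pR, uR => ([], pR, uR)
  | i :: is, pR, uR =>
    if PySem.Set.contains S i then
      match pR with
      | [] => pvBuildB S is [] uR
      | p :: ps => let r := pvBuildB S is ps uR; (p :: r.1, r.2)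
    else
      match uR with
      | [] => pvBuildB S is pR []
      | u :: us => let r := pvBuildB S is pR us; (u :: r.1, r.2)

def rootGen_alt (n : Int) (P : List Int) : List (List Int) :=
  let Ps := PySem.List.sorted P (fun x => x) false
  let unset := (PySem.List.pyRange 0 n 1).filter (fun i => !(PySem.Set.contains (PySem.Set.ofList Ps) i))
  (rootGenSubA Ps.length n Ps).map (fun posLst =>
    let pins := PySem.Set.ofList posLst
    let m : Int := match posLst.getLast? with | some t => t + 1 | none => 0
    let r := pvBuildB pins (PySem.List.pyRange 0 m 1) Ps unset
    r.1 ++ r.2.2)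

-- ===== PRECONDITION & SPEC =====
def Spec_rootGen (n : Int) (P : List Int) (out : List (List Int)) : Prop := out = rootGen_alt n P
instance (n : Int) (P : List Int) (out : List (List Int)) : Decidable (Spec_rootGen n P out) := by unfold Spec_rootGen; infer_instance

-- ===== CLAIM (what is proved, stated in full; the proofs are below) =====
def Claim_equal_rootGen : Prop := ∀ (n : Int) (P : List Int), Dom_rootGen n P → Spec_rootGen n P (rootGen n P)


-- ===== LEMMAS AND PROOFS =====

-- the end index of B's uniform pass: last position + 1 (j when the position list is empty)
def pvM (l : List Int) (j : Int) : Int :=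
  match l.getLast? with
  | some t => t + 1
  | none => j

theorem pvM_nil (j : Int) : pvM [] j = j := rfl

theorem pvM_cons (i : Int) (rest : List Int) (j : Int) :
    pvM (i :: rest) j = pvM rest (i + 1) := by
  cases rest with
  | nil => rfl
  | cons b bs =>
    unfold pvM
    rw [List.getLast?_cons_cons]
    cases h : (b :: bs).getLast? with
    | none => simp at h
    | some t => rfl

-- last element of a strictly increasing i :: l is at least i + l.length
theorem pvLast_ge : ∀ (l : List Int) (i j : Int), (i :: l).Pairwise (· < ·) →
    i + l.length + 1 ≤ pvM (i :: l) j := by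
  intro l
  induction l with
  | nil => intro i j _; simp [pvM]
  | cons b bs ih =>
    intro i j hp
    have hib : i < b := (List.pairwise_cons.1 hp).1 b (by simp)
    have h2 := ih b (i + 1) (List.pairwise_cons.1 hp).2
    rw [pvM_cons]
    simp only [List.length_cons] at h2 ⊢
    omega

-- the while-loop: consumes (i - j) elements from unSet when enough are available
theorem pvFillA_spec : ∀ (unSet : List Int) (i j : Int) (out : List Int),
    j ≤ i → (i - j).toNat ≤ unSet.length →
    pvFillA i j unSet out =
      (i, unSet.drop (i - j).toNat, out ++ unSet.take (i - j).toNat) := by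
  intro unSet
  induction unSet with
  | nil =>
    intro i j out hle hlen
    have : j = i := by simp at hlen; omega
    subst this
    rw [pvFillA]
    simp
  | cons u us ih =>
    intro i j out hle hlen
    rw [pvFillA]
    by_cases h : j < i
    · simp only [if_pos h]
      rw [ih i (j + 1) (out ++ [u]) (by omega) (by simp at hlen ⊢; omega)]
      have hd : (i - j).toNat = (i - (j + 1)).toNat + 1 := by omega
      rw [hd]
      simp
    · have : j = i := by omega
      subst this
      simp only [if_neg h]
      have h0 : (j - j).toNat = 0 := by omega
      rw [h0]
      simp

theorem pvAsmA_cons (i : Int) (rest : List Int) (j : Int) (unSet : List Int)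
    (p : Int) (ps : List Int) (out : List Int) :
    pvAsmA (i :: rest) j unSet (p :: ps) out =
      pvAsmA rest ((pvFillA i j unSet out).1 + 1) (pvFillA i j unSet out).2.1 ps
        ((pvFillA i j unSet out).2.2 ++ [p]) := rfl

-- invariant of the position generator: each yielded list has length k, is strictly
-- increasing, and its elements lie in [1, upperFixed)
theorem pvSub_inv : ∀ (k : Nat) (u : Int) (pin : List Int) (v : List Int),
    v ∈ rootGenSubA k u pin →
    v.length = k ∧ v.Pairwise (· < ·) ∧ ∀ x ∈ v, 1 ≤ x ∧ x < u := by
  intro k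
  induction k with
  | zero => intro u pin v hv; simp [rootGenSubA] at hv; simp [hv]
  | succ k ih =>
    intro u pin v hv
    rw [rootGenSubA] at hv
    cases hlast : pin.getLast? with
    | none => rw [hlast] at hv; simp at hv
    | some last =>
      rw [hlast] at hv
      simp only [List.mem_flatMap, List.mem_map] at hv
      obtain ⟨j, hj, val, hval, rfl⟩ := hv
      have hjr := PySem.List.mem_pyRange_one.1 hj
      obtain ⟨hlen, hpw, helem⟩ := ih (j - 1) pin.dropLast val hval
      have hju : j < min u last := hjr.2
      refine ⟨by simp [hlen], ?_, ?_⟩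
      · rw [List.pairwise_append]
        exact ⟨hpw, by simp, fun x hx y hy => by
          simp at hy; subst hy; have := (helem x hx).2; omega⟩
      · intro x hx
        rcases List.mem_append.1 hx with hx | hx
        · have h1 := helem x hx
          exact ⟨h1.1, by omega⟩
        · simp at hx
          have h1 := hjr.1
          constructor <;> omega

-- buildB over a concatenation composes
theorem pvBuildB_append (S : PySem.Set Int) :
    ∀ (xs ys pR uR : List Int),
    pvBuildB S (xs ++ ys) pR uR =
      ((pvBuildB S xs pR uR).1 ++
         (pvBuildB S ys (pvBuildB S xs pR uR).2.1 (pvBuildB S xs pR uR).2.2).1,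
       (pvBuildB S ys (pvBuildB S xs pR uR).2.1 (pvBuildB S xs pR uR).2.2).2) := by
  intro xs
  induction xs with
  | nil => intro ys pR uR; simp [pvBuildB]
  | cons i is ih =>
    intro ys pR uR
    by_cases h : i ∈ S
    · cases pR with
      | nil => simpa [pvBuildB, h] using ih ys [] uR
      | cons p ps => simp [pvBuildB, h, ih ys ps uR]
    · cases uR with
      | nil => simpa [pvBuildB, h] using ih ys pR []
      | cons u us => simp [pvBuildB, h, ih ys pR us]

-- buildB over indices none of which is in S copies from the unset iterator
theorem pvBuildB_notmem (S : PySem.Set Int) :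
    ∀ (xs uR pR : List Int), (∀ x ∈ xs, x ∉ S) →
    xs.length ≤ uR.length →
    pvBuildB S xs pR uR = (uR.take xs.length, pR, uR.drop xs.length) := by
  intro xs
  induction xs with
  | nil => intro uR pR _ _; simp [pvBuildB]
  | cons i is ih =>
    intro uR pR h hlen
    cases uR with
    | nil => simp at hlen
    | cons u us =>
      have hni : i ∉ S := h i (by simp)
      simp [pvBuildB, hni, ih us pR (fun x hx => h x (by simp [hx])) (by simpa using hlen)]

-- buildB only looks at S through membership of the scanned indices
theorem pvBuildB_congr (S S' : PySem.Set Int) :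
    ∀ (xs pR uR : List Int),
    (∀ x ∈ xs, x ∈ S ↔ x ∈ S') →
    pvBuildB S xs pR uR = pvBuildB S' xs pR uR := by
  intro xs
  induction xs with
  | nil => intro pR uR _; simp [pvBuildB]
  | cons i is ih =>
    intro pR uR h
    by_cases hc : i ∈ S
    · have hc' : i ∈ S' := (h i (by simp)).1 hc
      cases pR with
      | nil => simp [pvBuildB, hc, hc', ih [] uR (fun x hx => h x (by simp [hx]))]
      | cons p ps => simp [pvBuildB, hc, hc', ih ps uR (fun x hx => h x (by simp [hx]))]
    · have hc' : i ∉ S' := fun hx => hc ((h i (by simp)).2 hx)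
      cases uR with
      | nil => simp [pvBuildB, hc, hc', ih pR [] (fun x hx => h x (by simp [hx]))]
      | cons u us => simp [pvBuildB, hc, hc', ih pR us (fun x hx => h x (by simp [hx]))]

-- MAIN LEMMA: A's interleaving assembly equals B's uniform pass
theorem pvAsm_eq : ∀ (posLst pLst unSet out : List Int) (j : Int),
    posLst.Pairwise (· < ·) → (∀ x ∈ posLst, j ≤ x) →
    pLst.length = posLst.length →
    (pvM posLst j - j).toNat ≤ unSet.length + posLst.length →
    pvAsmA posLst j unSet pLst out =
      out ++ (pvBuildB (PySem.Set.ofList posLst) (PySem.List.pyRange j (pvM posLst j) 1) pLst unSet).1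
          ++ (pvBuildB (PySem.Set.ofList posLst) (PySem.List.pyRange j (pvM posLst j) 1) pLst unSet).2.2 := by
  intro posLst
  induction posLst with
  | nil =>
    intro pLst unSet out j _ _ _ _
    rw [pvM_nil, PySem.List.pyRange_one_eq_nil le_rfl]
    simp [pvAsmA, pvBuildB]
  | cons i rest ih =>
    intro pLst unSet out j hpw hge hlen hsuff
    cases pLst with
    | nil => simp at hlen
    | cons p ps =>
    have hji : j ≤ i := hge i (by simp)
    have hrest_pw : rest.Pairwise (· < ·) := (List.pairwise_cons.1 hpw).2
    have hrest_gt : ∀ x ∈ rest, i < x := (List.pairwise_cons.1 hpw).1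
    have hM : pvM (i :: rest) j = pvM rest (i + 1) := pvM_cons i rest j
    have hlast : i + rest.length + 1 ≤ pvM rest (i + 1) := by
      have := pvLast_ge rest i j hpw
      rw [hM] at this
      exact this
    rw [hM] at hsuff
    simp only [List.length_cons] at hsuff
    have hd : (i - j).toNat ≤ unSet.length := by omega
    -- LHS via the fill lemma
    rw [pvAsmA_cons, pvFillA_spec unSet i j out hji hd]
    simp only
    -- split the index range
    rw [hM]
    rw [PySem.List.pyRange_one_append j i (pvM rest (i + 1)) hji (by omega),
        PySem.List.pyRange_one_append i (i + 1) (pvM rest (i + 1)) (by omega) (by omega),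
        PySem.List.pyRange_one_singleton i]
    rw [pvBuildB_append, pvBuildB_append]
    -- first segment: indices below i, none of which is a pinnacle position
    have hseg1 : pvBuildB (PySem.Set.ofList (i :: rest)) (PySem.List.pyRange j i 1) (p :: ps) unSet
        = (unSet.take (i - j).toNat, p :: ps, unSet.drop (i - j).toNat) := by
      have := pvBuildB_notmem (PySem.Set.ofList (i :: rest)) (PySem.List.pyRange j i 1) unSet (p :: ps)
        (fun x hx => by
          have hxr := PySem.List.mem_pyRange_one.1 hx
          rw [PySem.Set.mem_ofList]
          simp only [List.mem_cons]
          rintro (rfl | hmem)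
          · omega
          · exact absurd (hrest_gt x hmem) (by omega))
        (by rw [PySem.List.length_pyRange_one]; exact hd)
      rw [this, PySem.List.length_pyRange_one]
    -- middle segment: exactly the pinnacle position i
    have hseg2 : pvBuildB (PySem.Set.ofList (i :: rest)) [i] (p :: ps) (unSet.drop (i - j).toNat)
        = ([p], ps, unSet.drop (i - j).toNat) := by
      have hi : i ∈ PySem.Set.ofList (i :: rest) := (PySem.Set.mem_ofList _ _).2 (by simp)
      simp [pvBuildB, hi]
    -- third segment: i is not scanned any more, so the set can shrink to rest
    have hseg3 : pvBuildB (PySem.Set.ofList (i :: rest))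
          (PySem.List.pyRange (i + 1) (pvM rest (i + 1)) 1) ps (unSet.drop (i - j).toNat)
        = pvBuildB (PySem.Set.ofList rest)
          (PySem.List.pyRange (i + 1) (pvM rest (i + 1)) 1) ps (unSet.drop (i - j).toNat) := by
      apply pvBuildB_congr
      intro x hx
      have hxr := PySem.List.mem_pyRange_one.1 hx
      rw [PySem.Set.mem_ofList, PySem.Set.mem_ofList]
      simp only [List.mem_cons]
      constructor
      · rintro (rfl | hmem)
        · omega
        · exact hmem
      · exact Or.inr
    rw [hseg1]
    simp only
    rw [hseg2]
    simp only
    rw [hseg3]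
    -- apply the induction hypothesis to the tail
    rw [ih ps (unSet.drop (i - j).toNat) (out ++ unSet.take (i - j).toNat ++ [p]) (i + 1)
      hrest_pw (fun x hx => by have := hrest_gt x hx; omega)
      (by simpa using hlen)
      (by rw [List.length_drop]; omega)]
    simp

-- the number of range(n) indices lying in Ps is at most Ps.length
theorem pvFilter_mem_le (n : Int) (Ps : List Int) :
    ((PySem.List.pyRange 0 n 1).filter
      (fun i => PySem.Set.contains (PySem.Set.ofList Ps) i)).length ≤ Ps.length := by
  set l := (PySem.List.pyRange 0 n 1).filter (fun i => PySem.Set.contains (PySem.Set.ofList Ps) i) with hl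
  have hnd : l.Nodup := (PySem.List.nodup_pyRange_one 0 n).filter _
  have hsub : l ⊆ Ps := by
    intro x hx
    rw [hl, List.mem_filter] at hx
    have := (PySem.Set.contains_iff _ _).1 hx.2
    exact (PySem.Set.mem_ofList Ps x).1 this
  calc l.length = l.toFinset.card := (List.toFinset_card_of_nodup hnd).symm
    _ ≤ Ps.toFinset.card := Finset.card_le_card (fun x hx => by
        simp only [List.mem_toFinset] at hx ⊢; exact hsub hx)
    _ ≤ Ps.length := List.toFinset_card_le Ps

-- filter and its complement partition a list
theorem pvFilter_split (l : List Int) (p : Int → Bool) :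
    (l.filter (fun x => !p x)).length + (l.filter p).length = l.length := by
  induction l with
  | nil => simp
  | cons a as ih =>
    by_cases h : p a <;> simp [h] <;> omega

-- ===== VERDICT (by name: the statement is the Claim_ definition above) =====
theorem rootGen_spec : Claim_equal_rootGen := by
  unfold Claim_equal_rootGen
  intro n P _
  unfold Spec_rootGen rootGen rootGen_alt
  simp only
  apply List.map_congr_left
  intro posLst hmem
  set Ps := PySem.List.sorted P (fun x => x) false with hPs
  set unset := (PySem.List.pyRange 0 n 1).filter
    (fun i => !(PySem.Set.contains (PySem.Set.ofList Ps) i)) with hunset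
  obtain ⟨hlen, hpw, helem⟩ := pvSub_inv Ps.length n Ps posLst hmem
  have hsuff : (pvM posLst 0 - 0).toNat ≤ unset.length + posLst.length := by
    cases hc : posLst with
    | nil => simp [pvM]
    | cons i rest =>
      subst hc
      have hlast : (i :: rest).getLast (by simp) ∈ i :: rest := List.getLast_mem _
      have hM0 : pvM (i :: rest) 0 = (i :: rest).getLast (by simp) + 1 := by
        unfold pvM
        rw [List.getLast?_eq_some_getLast (by simp)]
      have hlt : (i :: rest).getLast (by simp) < n := (helem _ hlast).2
      have hsplit := pvFilter_split (PySem.List.pyRange 0 n 1)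
        (fun i => PySem.Set.contains (PySem.Set.ofList Ps) i)
      have hle := pvFilter_mem_le n Ps
      have hcount : unset.length + Ps.length ≥ (PySem.List.pyRange 0 n 1).length := by
        rw [hunset]
        omega
      rw [PySem.List.length_pyRange_one] at hcount
      rw [hM0, hlen]
      omega
  have := pvAsm_eq posLst Ps unset [] 0 hpw
    (fun x hx => by have := (helem x hx).1; omega) hlen.symm hsuff
  rw [this]
  simp only [List.nil_append]
  rfl
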